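-- pv_equiv track=rewrite | github.com/SaradhaP6/Cryptis | src/main/messages.py | message_to_ternary
-- ===== SOURCE A (Python) =====
-- def message_to_ternary(message, number_bits=4):
--     """
--     Description : Returns the message coded in ternary
--     Arguments :
--         - message: Message to code (list)
--         - number_bits: Number of bits to code each letter
--                         & by default it is equal to 4
--     Returns:
--         - Ternary message (list)
--     """
--     ternary_message=[]
--
--     for i in message:
--         ascii_value = ord(i)
--
--         if ascii_value==0:
--             ternary_char = [0]
--         else:
--             ternary_char = []
--             # Saving the remainder of the division by 3 to deduce the ternary code
--             while ascii_value != 0: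
--                 remainder_division = ascii_value % 3
--                 ascii_value = ascii_value // 3
--                 if remainder_division == 2:
--                     remainder_division = -1
--                     ascii_value += 1
--                 ternary_char.append(remainder_division)
--
--         while len(ternary_char) < number_bits:
--             ternary_char.append(0)
--
--         # To invert the ternary code and to have exactly the number of bits wanted
--         ternary_message += ternary_char[::-1][:number_bits]
--
--     return ternary_message
-- ===== SOURCE B (Python) =====
-- def message_to_ternary(message, number_bits=4):
--     out = []
--     for ch in message:
--         n = ord(ch)
--         # plain base-3 digits, least-significant first
--         digits = []
--         while n:
--             n, r = divmod(n, 3)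
--             digits.append(r)
--         # carry-propagation pass: rewrite digit 2 as -1 with a carry into the next position
--         balanced = []
--         carry = 0
--         for d in digits:
--             t = d + carry
--             if t == 3:
--                 balanced.append(0)
--                 carry = 1
--             elif t == 2:
--                 balanced.append(-1)
--                 carry = 1
--             else:
--                 balanced.append(t)
--                 carry = 0
--         if carry:
--             balanced.append(1)
--         # pad to number_bits, most-significant first, keep number_bits digits
--         balanced.extend([0] * (number_bits - len(balanced)))
--         out += balanced[::-1][:number_bits]
--     return out
-- ===== Notes on version B (the rewrite author's own statement) =====
-- stated objective: alternative
-- what changed: A balances each digit inside the division loop (turning a remainder 2 into -1 and bumping the quotient) and pads with a while-loop; B first extracts the plain base-3 digits with divmod, then runs a separate carry-propagation pass that rewrites 2s as -1s, and pads with a computed block of zeros. Pre_ excludes messages containing a string whose length is not 1, on which A's ord() raises TypeError.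
import Mathlib
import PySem

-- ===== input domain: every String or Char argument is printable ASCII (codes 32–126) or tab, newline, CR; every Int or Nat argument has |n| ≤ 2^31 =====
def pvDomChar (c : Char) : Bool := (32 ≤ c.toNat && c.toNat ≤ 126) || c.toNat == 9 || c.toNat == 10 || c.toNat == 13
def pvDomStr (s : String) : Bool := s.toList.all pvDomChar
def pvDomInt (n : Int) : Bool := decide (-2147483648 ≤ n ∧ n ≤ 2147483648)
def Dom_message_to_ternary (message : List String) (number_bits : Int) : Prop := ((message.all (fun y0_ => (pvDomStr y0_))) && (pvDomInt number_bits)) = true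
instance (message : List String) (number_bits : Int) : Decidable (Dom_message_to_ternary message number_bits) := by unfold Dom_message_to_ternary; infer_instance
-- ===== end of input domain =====

-- B re-decomposes A's balanced-ternary conversion: plain base-3 digits first, then a
-- separate carry-propagation pass, then block padding; same cost, different structure.

-- ===== PORT A =====
-- ord(i): raises TypeError unless the string has exactly one character (excluded by Pre_);
-- the 0 returned on other shapes is never relied upon.
def pyOrd (s : String) : Int :=
  match s.toList with
  | [c] => (c.toNat : Int)
  | _ => 0

-- A's while-loop: balance each remainder as it is produced (2 ↦ -1, quotient += 1).
-- fuel n.toNat + 1 suffices: the (nonnegative) value strictly decreases each iteration.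
def ternLoopA : Nat → Int → List Int → List Int
  | 0, _, acc => acc
  | fuel + 1, n, acc =>
    if n = 0 then acc
    else
      let r := PySem.Int.mod n 3
      let n' := PySem.Int.floordiv n 3
      if r = 2 then ternLoopA fuel (n' + 1) (acc ++ [-1])
      else ternLoopA fuel n' (acc ++ [r])

def ternCharA (n : Int) : List Int :=
  if n = 0 then [0] else ternLoopA (n.toNat + 1) n []

-- A's padding while-loop: append single zeros while len < number_bits;
-- fuel (number_bits - len).toNat is exactly the number of iterations.
def padLoopA : Nat → List Int → Int → List Int
  | 0, xs, _ => xs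
  | fuel + 1, xs, nb => if (xs.length : Int) < nb then padLoopA fuel (xs ++ [0]) nb else xs

-- one iteration of A's for-loop body ([::-1] is reverse, PySem.List.slice?_none_none_neg_one)
def pieceA (s : String) (nb : Int) : List Int :=
  let tern := ternCharA (pyOrd s)
  let padded := padLoopA (nb - (tern.length : Int)).toNat tern nb
  PySem.List.slice padded.reverse none (some nb)

def message_to_ternary (message : List String) (number_bits : Int) : List Int :=
  message.foldl (fun acc s => acc ++ pieceA s number_bits) []

-- ===== PORT B =====
-- B pass 1: plain base-3 digits via divmod, least-significant first (no balancing).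
def base3LoopB : Nat → Int → List Int → List Int
  | 0, _, ds => ds
  | fuel + 1, n, ds =>
    if n = 0 then ds
    else base3LoopB fuel (PySem.Int.floordiv n 3) (ds ++ [PySem.Int.mod n 3])

-- B pass 2: carry propagation; state = (balanced digits so far, carry)
def carryStepB (st : List Int × Int) (d : Int) : List Int × Int :=
  let t := d + st.2
  if t = 3 then (st.1 ++ [0], 1)
  else if t = 2 then (st.1 ++ [-1], 1)
  else (st.1 ++ [t], 0)

def balancedB (n : Int) : List Int :=
  let digits := base3LoopB (n.toNat + 1) n []
  let st := digits.foldl carryStepB ([], 0)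
  if st.2 ≠ 0 then st.1 ++ [1] else st.1

-- one iteration of B's for-loop body: block padding, reverse, slice
def pieceB (s : String) (nb : Int) : List Int :=
  let balanced := balancedB (pyOrd s)
  let padded := balanced ++ List.replicate (nb - (balanced.length : Int)).toNat 0
  PySem.List.slice padded.reverse none (some nb)

def message_to_ternary_alt (message : List String) (number_bits : Int) : List Int :=
  message.foldl (fun acc s => acc ++ pieceB s number_bits) []

-- ===== PRECONDITION & SPEC =====
-- Pre_ excludes messages containing a string whose length is not 1: ord() raises TypeError there.
def Pre_message_to_ternary (message : List String) (number_bits : Int) : Prop :=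
  ∀ s ∈ message, s.toList.length = 1
instance (message : List String) (number_bits : Int) : Decidable (Pre_message_to_ternary message number_bits) := by unfold Pre_message_to_ternary; infer_instance

def pvWitness_message_to_ternary : List String × Int := (["H", "i"], 4)

def Spec_message_to_ternary (message : List String) (number_bits : Int) (out : List Int) : Prop := out = message_to_ternary_alt message number_bits
instance (message : List String) (number_bits : Int) (out : List Int) : Decidable (Spec_message_to_ternary message number_bits out) := by unfold Spec_message_to_ternary; infer_instance

-- ===== CLAIM (what is proved, stated in full; the proofs are below) =====
def Claim_equal_message_to_ternary : Prop := ∀ (message : List String) (number_bits : Int), Dom_message_to_ternary message number_bits → Pre_message_to_ternary message number_bits → Spec_message_to_ternary message number_bits (message_to_ternary message number_bits)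

-- ===== LEMMAS AND PROOFS =====

-- the two per-character digit computations agree on every character code in Dom
theorem core_eq : ∀ n : Nat, n < 127 → 0 < n → ternCharA (n : Int) = balancedB (n : Int) := by
  decide

-- A's padding while-loop, run with its exact iteration count, is B's block padding
theorem pad_eq : ∀ (k : Nat) (xs : List Int) (nb : Int), k = (nb - (xs.length : Int)).toNat →
    padLoopA k xs nb = xs ++ List.replicate k 0 := by
  intro k
  induction k with
  | zero => intro xs nb _; simp [padLoopA]
  | succ k ih =>
    intro xs nb hk
    have hlt : (xs.length : Int) < nb := by omega
    have hk' : k = (nb - ((xs ++ [0]).length : Int)).toNat := by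
      simp only [List.length_append, List.length_cons, List.length_nil]
      omega
    simp only [padLoopA, if_pos hlt, ih (xs ++ [0]) nb hk']
    simp [List.replicate_succ]

theorem piece_eq (s : String) (nb : Int) (hp : s.toList.length = 1) (hd : pvDomStr s = true) :
    pieceA s nb = pieceB s nb := by
  obtain ⟨c, hc⟩ : ∃ c, s.toList = [c] := by
    cases h : s.toList with
    | nil => rw [h] at hp; simp at hp
    | cons a t =>
      rw [h] at hp
      simp only [List.length_cons] at hp
      have : t = [] := by
        cases t with
        | nil => rfl
        | cons b u => simp at hp
      exact ⟨a, by rw [this]⟩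
  have hord : pyOrd s = (c.toNat : Int) := by simp [pyOrd, hc]
  have hdc : pvDomChar c = true := by
    unfold pvDomStr at hd
    rw [hc] at hd
    simpa using hd
  have hbounds : 0 < c.toNat ∧ c.toNat < 127 := by
    simp only [pvDomChar, Bool.or_eq_true, Bool.and_eq_true, beq_iff_eq,
      decide_eq_true_eq] at hdc
    omega
  have hcore : ternCharA (pyOrd s) = balancedB (pyOrd s) := by
    rw [hord]; exact core_eq c.toNat hbounds.2 hbounds.1
  simp only [pieceA, pieceB, hcore]
  rw [pad_eq _ _ _ rfl]

theorem fold_eq (msg : List String) (nb : Int) :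
    ∀ acc : List Int, (∀ s ∈ msg, s.toList.length = 1 ∧ pvDomStr s = true) →
    msg.foldl (fun a s => a ++ pieceA s nb) acc = msg.foldl (fun a s => a ++ pieceB s nb) acc := by
  induction msg with
  | nil => intro acc _; rfl
  | cons s t ih =>
    intro acc h
    have hs := h s (by simp)
    simp only [List.foldl_cons]
    rw [piece_eq s nb hs.1 hs.2]
    exact ih _ (fun x hx => h x (by simp [hx]))

-- ===== VERDICT (by name: the statement is the Claim_ definition above) =====
theorem message_to_ternary_spec : Claim_equal_message_to_ternary := by
  intro message number_bits hdom hpre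
  unfold Spec_message_to_ternary message_to_ternary message_to_ternary_alt
  apply fold_eq
  intro s hs
  refine ⟨hpre s hs, ?_⟩
  unfold Dom_message_to_ternary at hdom
  simp only [Bool.and_eq_true, List.all_eq_true] at hdom
  exact hdom.1 s hs
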